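-- pv_equiv track=rewrite | github.com/surajkumar19/Competitive-Programming | exam_week1/Queue_Reconstruction.py | check
-- ===== SOURCE A (Python) =====
-- def check(l, value):
--
--     count =0
--     for i in range(len(l)):
--         kk = l[i][0]
--         if l[i][0] >= value[0]:
--             count+=1
--             if count == value[1]:
--                 return i+1
-- ===== SOURCE B (Python) =====
-- def check(l, value):
--     pref = [0]
--     for p in l:
--         pref.append(pref[-1] + (1 if p[0] >= value[0] else 0))
--     k = value[1]
--     lo, hi = 0, len(l)
--     while lo < hi:
--         mid = (lo + hi) // 2
--         if pref[mid + 1] < k: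
--             lo = mid + 1
--         else:
--             hi = mid
--     if lo < len(l) and pref[lo + 1] == k and l[lo][0] >= value[0]:
--         return lo + 1
--     return None
-- ===== Notes on version B (the rewrite author's own statement) =====
-- stated objective: alternative
-- what changed: B builds a monotone prefix-count array of qualifying elements and binary-searches it for the first position where the running count reaches value[1], instead of A's single counting scan with early return.
import Mathlib
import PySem

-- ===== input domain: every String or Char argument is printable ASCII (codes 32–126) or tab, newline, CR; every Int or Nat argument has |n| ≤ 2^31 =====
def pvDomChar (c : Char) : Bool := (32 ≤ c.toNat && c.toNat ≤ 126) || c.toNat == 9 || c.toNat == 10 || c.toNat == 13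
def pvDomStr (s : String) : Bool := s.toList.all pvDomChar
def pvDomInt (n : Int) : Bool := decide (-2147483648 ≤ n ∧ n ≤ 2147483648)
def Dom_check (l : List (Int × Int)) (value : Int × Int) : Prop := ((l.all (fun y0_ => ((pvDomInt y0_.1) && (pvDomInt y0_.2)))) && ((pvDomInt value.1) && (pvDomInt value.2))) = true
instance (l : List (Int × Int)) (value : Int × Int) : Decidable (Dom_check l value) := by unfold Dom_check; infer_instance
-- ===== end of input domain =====

-- B replaces A's counting scan with early return by a prefix-count array plus a binary
-- search for the first position where the running count reaches value.2 (objective: alternative).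

-- ===== PORT A =====
-- the for-loop over range(len(l)) with the running `count` and the early `return i+1`,
-- as a structural recursion carrying the index i and the counter
def checkGo (v0 target : Int) : List (Int × Int) → Int → Int → Option Int
  | [], _, _ => none
  | p :: rest, i, count =>
    if p.1 ≥ v0 then
      if count + 1 = target then some (i + 1)
      else checkGo v0 target rest (i + 1) (count + 1)
    else checkGo v0 target rest (i + 1) count

def check (l : List (Int × Int)) (value : Int × Int) : Option Int :=
  checkGo value.1 value.2 l 0 0

-- ===== PORT B =====
-- the while-loop `while lo < hi: …` of Source B; terminates because hi - lo shrinks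
def bsearch (pref : List Int) (k : Int) (lo hi : Nat) : Nat :=
  if lo < hi then
    -- mid = (lo + hi) // 2, written inline at both uses
    if pref.getD ((lo + hi) / 2 + 1) 0 < k then bsearch pref k ((lo + hi) / 2 + 1) hi
    else bsearch pref k lo ((lo + hi) / 2)
  else lo
termination_by hi - lo
decreasing_by all_goals omega

-- pref[mid+1], pref[lo+1] and l[lo] are always in range at their uses (mid < hi ≤ len l,
-- and lo < len l is checked first), so getD is exact for Python's indexing here
def check_alt (l : List (Int × Int)) (value : Int × Int) : Option Int :=
  let pref := l.foldl (fun acc p => acc ++ [(acc.getLast?.getD 0) + (if p.1 ≥ value.1 then 1 else 0)]) [0]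
  let lo := bsearch pref value.2 0 l.length
  if lo < l.length ∧ pref.getD (lo + 1) 0 = value.2 ∧ (l.getD lo (0, 0)).1 ≥ value.1 then
    some ((lo : Int) + 1)
  else none

-- ===== PRECONDITION & SPEC =====
def Spec_check (l : List (Int × Int)) (value : Int × Int) (out : Option Int) : Prop := out = check_alt l value
instance (l : List (Int × Int)) (value : Int × Int) (out : Option Int) : Decidable (Spec_check l value out) := by unfold Spec_check; infer_instance

-- ===== CLAIM (what is proved, stated in full; the proofs are below) =====
def Claim_equal_check : Prop := ∀ (l : List (Int × Int)) (value : Int × Int), Dom_check l value → Spec_check l value (check l value)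

-- ===== LEMMAS AND PROOFS =====

-- the list of qualifying 1-based positions of `rest`, positions starting at i+1
def qual (v0 : Int) : List (Int × Int) → Int → List Int
  | [], _ => []
  | p :: rest, i =>
    if p.1 ≥ v0 then (i + 1) :: qual v0 rest (i + 1) else qual v0 rest (i + 1)

-- index of the (m+1)-th qualifying element (0-based)
def firstIdx (v0 : Int) : List (Int × Int) → Nat → Option Nat
  | [], _ => none
  | p :: r, 0 => if p.1 ≥ v0 then some 0 else (firstIdx v0 r 0).map (· + 1)
  | p :: r, m + 1 =>
    if p.1 ≥ v0 then (firstIdx v0 r m).map (· + 1)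
    else (firstIdx v0 r (m + 1)).map (· + 1)

-- number of qualifying elements among the first j
def cntT (v0 : Int) (l : List (Int × Int)) (j : Nat) : Int :=
  ((l.take j).countP (fun p => decide (p.1 ≥ v0)) : Int)

-- reference shape of the prefix-count list
def prefFrom (v0 c : Int) : List (Int × Int) → List Int
  | [] => [c]
  | p :: r => c :: prefFrom v0 (c + (if p.1 ≥ v0 then 1 else 0)) r

theorem pyGet?_cons_of_one_le {α : Type} (x : α) (xs : List α) (i : Int) (h : 1 ≤ i) :
    PySem.List.pyGet? (x :: xs) i = PySem.List.pyGet? xs (i - 1) := by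
  rw [PySem.List.pyGet?_of_nonneg _ (by omega), PySem.List.pyGet?_of_nonneg _ (by omega)]
  have : i.toNat = (i - 1).toNat + 1 := by omega
  rw [this, List.getElem?_cons_succ]

theorem checkGo_eq (v0 target : Int) (l : List (Int × Int)) : ∀ i count : Int,
    checkGo v0 target l i count =
      if 1 ≤ target - count then PySem.List.pyGet? (qual v0 l i) (target - count - 1)
      else none := by
  induction l with
  | nil =>
    intro i count
    simp only [checkGo, qual]
    split
    · rw [eq_comm, PySem.List.pyGet?_eq_none_iff]
      simp only [PySem.Raise.InRange, List.length_nil]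
      omega
    · rfl
  | cons p rest ih =>
    intro i count
    simp only [checkGo, qual]
    by_cases hq : p.1 ≥ v0
    · simp only [if_pos hq]
      by_cases hc : count + 1 = target
      · have h1 : target - count = 1 := by omega
        simp [hc, h1]
      · rw [if_neg hc, ih]
        by_cases ht : 1 ≤ target - count
        · rw [if_pos ht, pyGet?_cons_of_one_le _ _ _ (by omega)]
          have ht2 : 1 ≤ target - (count + 1) := by omega
          rw [if_pos ht2]
          ring_nf
        · rw [if_neg ht, if_neg (by omega)]
    · simp only [if_neg hq]
      rw [ih]

theorem foldl_pref (v0 : Int) (l : List (Int × Int)) : ∀ (acc : List Int) (c : Int),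
    l.foldl (fun acc p => acc ++ [(acc.getLast?.getD 0) + (if p.1 ≥ v0 then 1 else 0)]) (acc ++ [c])
      = acc ++ prefFrom v0 c l := by
  induction l with
  | nil => intro acc c; simp [prefFrom]
  | cons p r ih =>
    intro acc c
    simp only [List.foldl_cons, prefFrom]
    rw [List.getLast?_concat]
    have : (acc ++ [c]) ++ [c + (if p.1 ≥ v0 then 1 else 0)]
        = (acc ++ [c]) ++ [c + (if p.1 ≥ v0 then 1 else 0)] := rfl
    rw [show Option.getD (some c) 0 = c from rfl]
    rw [ih (acc ++ [c]) (c + (if p.1 ≥ v0 then 1 else 0))]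
    simp [prefFrom]

theorem cntT_zero (v0 : Int) (l : List (Int × Int)) : cntT v0 l 0 = 0 := by
  simp [cntT]

theorem cntT_succ_cons (v0 : Int) (p : Int × Int) (r : List (Int × Int)) (j : Nat) :
    cntT v0 (p :: r) (j + 1) = (if p.1 ≥ v0 then 1 else 0) + cntT v0 r j := by
  simp only [cntT, List.take_succ_cons, List.countP_cons]
  by_cases h : p.1 ≥ v0 <;> simp [h] <;> push_cast <;> ring

theorem cntT_nonneg (v0 : Int) (l : List (Int × Int)) (j : Nat) : 0 ≤ cntT v0 l j := by
  simp [cntT]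

theorem cntT_mono (v0 : Int) (l : List (Int × Int)) {j j' : Nat} (h : j ≤ j') :
    cntT v0 l j ≤ cntT v0 l j' := by
  unfold cntT
  have hsub : (l.take j).Sublist (l.take j') := by
    have := List.take_sublist j (l.take j')
    rwa [List.take_take, Nat.min_eq_left h] at this
  exact_mod_cast hsub.countP_le

theorem cntT_pos_of_qual (v0 : Int) (l : List (Int × Int)) : ∀ lo : Nat, lo < l.length →
    (l.getD lo (0, 0)).1 ≥ v0 → 1 ≤ cntT v0 l (lo + 1) := by
  induction l with
  | nil => intro lo h; simp at h
  | cons p r ih =>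
    intro lo hlo hq
    cases lo with
    | zero =>
      rw [cntT_succ_cons]
      simp only [List.getD_cons_zero] at hq
      rw [if_pos hq, cntT_zero]
      omega
    | succ lo' =>
      rw [cntT_succ_cons]
      simp only [List.getD_cons_succ] at hq
      have := ih lo' (by simpa using hlo) hq
      split <;> omega

theorem prefFrom_getD (v0 : Int) (l : List (Int × Int)) : ∀ (c : Int) (j : Nat), j ≤ l.length →
    (prefFrom v0 c l).getD j 0 = c + cntT v0 l j := by
  induction l with
  | nil =>
    intro c j hj
    have hj0 : j = 0 := by simpa using hj
    subst hj0
    simp [prefFrom, cntT]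
  | cons p r ih =>
    intro c j hj
    cases j with
    | zero => simp [prefFrom, cntT_zero]
    | succ j' =>
      simp only [prefFrom, List.getD_cons_succ, cntT_succ_cons]
      rw [ih _ j' (by simpa using hj)]
      ring

theorem qual_get? (v0 : Int) (l : List (Int × Int)) : ∀ (i : Int) (m : Nat),
    (qual v0 l i)[m]? = (firstIdx v0 l m).map (fun (j : Nat) => i + (j : Int) + 1) := by
  induction l with
  | nil => intro i m; cases m <;> simp [qual, firstIdx]
  | cons p r ih =>
    intro i m
    cases m with
    | zero =>
      simp only [qual, firstIdx]
      by_cases hq : p.1 ≥ v0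
      · simp [hq]
      · simp only [if_neg hq]
        rw [ih (i + 1) 0]
        cases h' : firstIdx v0 r 0 with
        | none => simp
        | some a => simp; omega
    | succ m' =>
      simp only [qual, firstIdx]
      by_cases hq : p.1 ≥ v0
      · simp only [if_pos hq, List.getElem?_cons_succ]
        rw [ih (i + 1) m']
        cases h' : firstIdx v0 r m' with
        | none => simp
        | some a => simp; omega
      · simp only [if_neg hq]
        rw [ih (i + 1) (m' + 1)]
        cases h' : firstIdx v0 r (m' + 1) with
        | none => simp
        | some a => simp; omega

theorem firstIdx_some (v0 : Int) (l : List (Int × Int)) : ∀ (m j : Nat),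
    firstIdx v0 l m = some j →
      j < l.length ∧ cntT v0 l (j + 1) = (m : Int) + 1 ∧ (l.getD j (0, 0)).1 ≥ v0 ∧
        ∀ j' < j, cntT v0 l (j' + 1) ≤ (m : Int) := by
  induction l with
  | nil => intro m j h; cases m <;> simp [firstIdx] at h
  | cons p r ih =>
    intro m j h
    cases m with
    | zero =>
      rw [firstIdx] at h
      by_cases hq : p.1 ≥ v0
      · rw [if_pos hq] at h
        obtain rfl : (0 : Nat) = j := by simpa using h
        refine ⟨by simp, ?_, by simpa using hq, by omega⟩
        rw [cntT_succ_cons, if_pos hq, cntT_zero]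
        omega
      · rw [if_neg hq, Option.map_eq_some_iff] at h
        obtain ⟨j'', hj'', rfl⟩ := h
        obtain ⟨h1, h2, h3, h4⟩ := ih 0 j'' hj''
        refine ⟨by simpa using h1, ?_, by simpa using h3, ?_⟩
        · rw [cntT_succ_cons, if_neg hq, h2]; norm_num
        · intro j' hj'
          cases j' with
          | zero =>
            rw [cntT_succ_cons, if_neg hq, cntT_zero]
            have := cntT_nonneg v0 r 0
            omega
          | succ j2 =>
            rw [cntT_succ_cons, if_neg hq]
            have := h4 j2 (by omega)
            omega
    | succ m' =>
      rw [firstIdx] at h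
      by_cases hq : p.1 ≥ v0
      · rw [if_pos hq, Option.map_eq_some_iff] at h
        obtain ⟨j'', hj'', rfl⟩ := h
        obtain ⟨h1, h2, h3, h4⟩ := ih m' j'' hj''
        refine ⟨by simpa using h1, ?_, by simpa using h3, ?_⟩
        · rw [cntT_succ_cons, if_pos hq, h2]; push_cast; ring
        · intro j' hj'
          cases j' with
          | zero =>
            rw [cntT_succ_cons, if_pos hq, cntT_zero]
            omega
          | succ j2 =>
            rw [cntT_succ_cons, if_pos hq]
            have := h4 j2 (by omega)
            push_cast
            omega
      · rw [if_neg hq, Option.map_eq_some_iff] at h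
        obtain ⟨j'', hj'', rfl⟩ := h
        obtain ⟨h1, h2, h3, h4⟩ := ih (m' + 1) j'' hj''
        refine ⟨by simpa using h1, ?_, by simpa using h3, ?_⟩
        · rw [cntT_succ_cons, if_neg hq, h2]; ring
        · intro j' hj'
          cases j' with
          | zero =>
            rw [cntT_succ_cons, if_neg hq, cntT_zero]
            have := cntT_nonneg v0 r 0
            omega
          | succ j2 =>
            rw [cntT_succ_cons, if_neg hq]
            have := h4 j2 (by omega)
            omega

theorem firstIdx_none (v0 : Int) (l : List (Int × Int)) : ∀ m : Nat,
    firstIdx v0 l m = none → cntT v0 l l.length ≤ (m : Int) := by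
  induction l with
  | nil => intro m _; simp [cntT]
  | cons p r ih =>
    intro m h
    cases m with
    | zero =>
      rw [firstIdx] at h
      by_cases hq : p.1 ≥ v0
      · rw [if_pos hq] at h; simp at h
      · rw [if_neg hq, Option.map_eq_none_iff] at h
        have := ih 0 h
        simp only [List.length_cons]
        rw [cntT_succ_cons, if_neg hq]
        omega
    | succ m' =>
      rw [firstIdx] at h
      by_cases hq : p.1 ≥ v0
      · rw [if_pos hq, Option.map_eq_none_iff] at h
        have := ih m' h
        simp only [List.length_cons]
        rw [cntT_succ_cons, if_pos hq]
        push_cast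
        omega
      · rw [if_neg hq, Option.map_eq_none_iff] at h
        have := ih (m' + 1) h
        simp only [List.length_cons]
        rw [cntT_succ_cons, if_neg hq]
        omega

theorem bsearch_spec (pref : List Int) (k : Int) : ∀ (d lo hi : Nat), hi - lo = d → lo ≤ hi →
    (∀ a b : Nat, a ≤ b → b < hi → pref.getD (a + 1) 0 ≤ pref.getD (b + 1) 0) →
    lo ≤ bsearch pref k lo hi ∧ bsearch pref k lo hi ≤ hi ∧
      (∀ j, lo ≤ j → j < bsearch pref k lo hi → pref.getD (j + 1) 0 < k) ∧
      (bsearch pref k lo hi < hi → k ≤ pref.getD (bsearch pref k lo hi + 1) 0) := by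
  intro d
  induction d using Nat.strong_induction_on with
  | _ d ih =>
    intro lo hi hd hle hmono
    by_cases hlt : lo < hi
    · rw [bsearch, if_pos hlt]
      by_cases hcmp : pref.getD ((lo + hi) / 2 + 1) 0 < k
      · rw [if_pos hcmp]
        obtain ⟨i1, i2, i3, i4⟩ :=
          ih (hi - ((lo + hi) / 2 + 1)) (by omega) ((lo + hi) / 2 + 1) hi rfl (by omega) hmono
        refine ⟨by omega, i2, ?_, i4⟩
        intro j hj1 hj2
        by_cases hjm : (lo + hi) / 2 + 1 ≤ j
        · exact i3 j hjm hj2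
        · calc pref.getD (j + 1) 0 ≤ pref.getD ((lo + hi) / 2 + 1) 0 :=
                hmono j ((lo + hi) / 2) (by omega) (by omega)
            _ < k := hcmp
      · rw [if_neg hcmp]
        obtain ⟨i1, i2, i3, i4⟩ :=
          ih ((lo + hi) / 2 - lo) (by omega) lo ((lo + hi) / 2) rfl (by omega)
            (fun a b hab hb => hmono a b hab (by omega))
        refine ⟨i1, by omega, i3, ?_⟩
        intro hr
        by_cases hrm : bsearch pref k lo ((lo + hi) / 2) < (lo + hi) / 2
        · exact i4 hrm
        · have heq : bsearch pref k lo ((lo + hi) / 2) = (lo + hi) / 2 := by omega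
          rw [heq]
          omega
    · rw [bsearch, if_neg hlt]
      exact ⟨le_refl _, by omega, by omega, by omega⟩

-- ===== VERDICT (by name: the statement is the Claim_ definition above) =====
theorem check_spec : Claim_equal_check := by
  intro l value _
  unfold Spec_check check check_alt
  rw [checkGo_eq]
  simp only [sub_zero]
  have hpref : (l.foldl (fun acc p => acc ++ [(acc.getLast?.getD 0) + (if p.1 ≥ value.1 then 1 else 0)]) [0])
      = prefFrom value.1 0 l := by
    have := foldl_pref value.1 l [] 0
    simpa using this
  rw [hpref]
  have hgetD : ∀ j : Nat, j ≤ l.length → (prefFrom value.1 0 l).getD j 0 = cntT value.1 l j := by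
    intro j hj
    rw [prefFrom_getD value.1 l 0 j hj]
    ring
  have hmono : ∀ a b : Nat, a ≤ b → b < l.length →
      (prefFrom value.1 0 l).getD (a + 1) 0 ≤ (prefFrom value.1 0 l).getD (b + 1) 0 := by
    intro a b hab hb
    rw [hgetD (a + 1) (by omega), hgetD (b + 1) (by omega)]
    exact cntT_mono value.1 l (by omega)
  obtain ⟨b1, b2, b3, b4⟩ := bsearch_spec (prefFrom value.1 0 l) value.2 l.length 0 l.length (by omega) (by omega) hmono
  set r := bsearch (prefFrom value.1 0 l) value.2 0 l.length with hr
  by_cases hk : 1 ≤ value.2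
  · rw [if_pos hk]
    rw [PySem.List.pyGet?_of_nonneg _ (by omega)]
    rw [qual_get? value.1 l 0 (value.2 - 1).toNat]
    have hm : ((value.2 - 1).toNat : Int) = value.2 - 1 := by omega
    cases hfi : firstIdx value.1 l (value.2 - 1).toNat with
    | none =>
      have hcnt := firstIdx_none value.1 l _ hfi
      rw [hm] at hcnt
      rw [if_neg]
      · simp
      · rintro ⟨c1, c2, c3⟩
        rw [hgetD (r + 1) (by omega)] at c2
        have := cntT_mono value.1 l (show r + 1 ≤ l.length by omega)
        omega
    | some j =>
      obtain ⟨f1, f2, f3, f4⟩ := firstIdx_some value.1 l _ j hfi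
      rw [hm] at f2 f4
      have hrj : r = j := by
        by_contra hne
        rcases Nat.lt_or_ge r j with hlt | hge
        · have hv := b4 (by omega)
          rw [hgetD (r + 1) (by omega)] at hv
          have := f4 r hlt
          omega
        · have hjr : j < r := by omega
          have hv := b3 j (by omega) hjr
          rw [hgetD (j + 1) (by omega)] at hv
          omega
      have hcond : r < l.length ∧ (prefFrom value.1 0 l).getD (r + 1) 0 = value.2 ∧
          (l.getD r (0, 0)).1 ≥ value.1 := by
        refine ⟨by omega, ?_, by rw [hrj]; exact f3⟩
        rw [hrj, hgetD (j + 1) (by omega), f2]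
        omega
      rw [if_pos hcond, hrj, Option.map_some]
      norm_num
  · rw [if_neg hk]
    rw [eq_comm, if_neg]
    rintro ⟨c1, c2, c3⟩
    rw [hgetD (r + 1) (by omega)] at c2
    have := cntT_pos_of_qual value.1 l r c1 c3
    omega
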